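-- pv_equiv track=rewrite | github.com/ryanpetris/DNS-Sync | zonebase/record_data.py | quote_data
-- ===== SOURCE A (Python) =====
-- from typing import Type, Union
--
-- def quote_data(data: Union[str, None] = None) -> str:
--     escape_char = "\\"
--     quote_char = '"'
--     chars_to_escape = "\\\";"
--
--     result = quote_char
--
--     if data:
--         for char in data:
--             if char in chars_to_escape:
--                 result += escape_char
--
--             result += char
--
--     result += quote_char
--
--     return result
-- ===== SOURCE B (Python) =====
-- def quote_data(data=None):
--     quote_char = '"'
--     if data:
--         inner = data.replace('\\', '\\\\').replace('"', '\\"').replace(';', '\\;')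
--     else:
--         inner = ''
--     return quote_char + inner + quote_char
-- ===== Notes on version B (the rewrite author's own statement) =====
-- stated objective: idiomatic
-- what changed: Replaced the per-character loop with conditional escaping by a fixed chain of str.replace calls (backslash first, then quote, then semicolon) and a single concatenation with the quote characters.
import Mathlib
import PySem

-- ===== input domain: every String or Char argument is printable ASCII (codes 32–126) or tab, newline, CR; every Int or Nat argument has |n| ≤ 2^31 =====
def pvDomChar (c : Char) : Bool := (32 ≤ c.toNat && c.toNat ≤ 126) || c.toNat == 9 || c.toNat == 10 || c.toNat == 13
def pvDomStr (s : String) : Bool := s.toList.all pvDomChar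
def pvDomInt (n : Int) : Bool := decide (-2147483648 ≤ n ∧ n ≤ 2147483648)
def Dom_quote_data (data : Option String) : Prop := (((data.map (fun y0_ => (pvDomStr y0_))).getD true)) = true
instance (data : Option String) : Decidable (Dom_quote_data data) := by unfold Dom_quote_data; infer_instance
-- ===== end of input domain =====

-- ===== PORT A =====
-- One honest line: B escapes via a fixed chain of str.replace calls instead of A's per-character loop; same output, idiomatic.
-- A's string concatenation is ported on List Char (Lean's own String.append is kernel-opaque), wrapped back with String.ofList.
def quote_data (data : Option String) : String :=
  let escape_char : List Char := ['\\']
  let quote_char : List Char := ['"']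
  let chars_to_escape : List Char := ['\\', '"', ';']
  let result := quote_char
  let result :=
    match data with
    | none => result      -- `if data:` false
    | some s =>
      if s.toList ≠ [] then  -- `if data:` truthiness of the string
        s.toList.foldl (fun r c =>
          (if c ∈ chars_to_escape then r ++ escape_char else r) ++ [c]) result
      else result
  String.ofList (result ++ quote_char)

-- ===== PORT B =====
def quote_data_alt (data : Option String) : String :=
  let quote_char : List Char := ['"']
  let inner : String :=
    match data with
    | none => ""
    | some s =>
      if s.toList ≠ [] then
        PySem.Str.replace (PySem.Str.replace (PySem.Str.replace s "\\" "\\\\") "\"" "\\\"") ";" "\\;"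
      else ""
  String.ofList (quote_char ++ inner.toList ++ quote_char)  -- quote_char + inner + quote_char

-- ===== PRECONDITION & SPEC =====
def Spec_quote_data (data : Option String) (out : String) : Prop := out = quote_data_alt data
instance (data : Option String) (out : String) : Decidable (Spec_quote_data data out) := by unfold Spec_quote_data; infer_instance

-- ===== CLAIM (what is proved, stated in full; the proofs are below) =====
def Claim_equal_quote_data : Prop := ∀ (data : Option String), Dom_quote_data data → Spec_quote_data data (quote_data data)

-- ===== LEMMAS AND PROOFS =====

-- single-character replace is a flatMap
theorem replace_go_single (o : Char) (new : List Char) :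
    ∀ (l : List Char) (fuel : Nat) (acc : List Char), l.length ≤ fuel →
      PySem.Chars.replace.go [o] new fuel l acc
        = acc.reverse ++ l.flatMap (fun c => if c = o then new else [c]) := by
  intro l
  induction l with
  | nil =>
    intro fuel acc _
    cases fuel <;> simp [PySem.Chars.replace.go]
  | cons c t ih =>
    intro fuel acc h
    cases fuel with
    | zero => simp at h
    | succ n =>
      simp only [PySem.Chars.replace.go]
      by_cases hc : c = o
      · subst hc
        simp only [List.isPrefixOf, BEq.rfl, Bool.true_and, if_true,
          List.length_singleton, List.drop_one, List.tail_cons]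
        rw [ih _ _ (by simpa using h)]
        simp
      · have : List.isPrefixOf [o] (c :: t) = false := by
          simp [List.isPrefixOf]
          exact fun h' => hc h'.symm
        rw [this]
        simp only [Bool.false_eq_true, if_false]
        rw [ih _ _ (by simpa using Nat.le_of_succ_le_succ h)]
        simp [hc]

theorem replace_single (o : Char) (new : List Char) (l : List Char) :
    PySem.Chars.replace l [o] new = l.flatMap (fun c => if c = o then new else [c]) := by
  simp [PySem.Chars.replace]
  rw [replace_go_single o new l l.length [] (le_refl _)]
  simp

def escFun (c : Char) : List Char := if c ∈ (['\\', '"', ';'] : List Char) then ['\\', c] else [c]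

-- A's loop body, folded from any accumulator, is accumulator ++ flatMap escFun
theorem foldl_esc (l : List Char) : ∀ init : List Char,
    l.foldl (fun r c => (if c ∈ (['\\', '"', ';'] : List Char) then r ++ ['\\'] else r) ++ [c]) init
      = init ++ l.flatMap escFun := by
  induction l with
  | nil => intro init; simp
  | cons c t ih =>
    intro init
    simp only [List.foldl_cons, List.flatMap_cons, ih]
    by_cases hc : c ∈ (['\\', '"', ';'] : List Char) <;> simp [escFun, hc]

-- the three replace passes compose to escFun
theorem chain_eq_esc (l : List Char) :
    ((l.flatMap (fun c => if c = '\\' then ['\\', '\\'] else [c])).flatMap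
        (fun c => if c = '"' then ['\\', '"'] else [c])).flatMap
        (fun c => if c = ';' then ['\\', ';'] else [c])
      = l.flatMap escFun := by
  induction l with
  | nil => rfl
  | cons c t ih =>
    simp only [List.flatMap_cons, List.flatMap_append, ih]
    congr 1
    by_cases h1 : c = '\\'
    · subst h1; decide
    · by_cases h2 : c = '"'
      · subst h2; decide
      · by_cases h3 : c = ';'
        · subst h3; decide
        · simp [h1, h2, h3, escFun]

-- ===== VERDICT (by name: the statement is the Claim_ definition above) =====
theorem quote_data_spec : Claim_equal_quote_data := by
  intro data _
  unfold Spec_quote_data quote_data quote_data_alt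
  cases data with
  | none => rfl
  | some s =>
    by_cases hs : s.toList = []
    · simp [hs]
    · simp only [hs, ne_eq, not_false_eq_true, if_true]
      rw [foldl_esc]
      have hrep : (PySem.Str.replace (PySem.Str.replace (PySem.Str.replace s "\\" "\\\\") "\"" "\\\"") ";" "\\;").toList
          = s.toList.flatMap escFun := by
        rw [PySem.Str.toList_replace, PySem.Str.toList_replace, PySem.Str.toList_replace]
        show PySem.Chars.replace (PySem.Chars.replace (PySem.Chars.replace s.toList ['\\'] ['\\','\\']) ['"'] ['\\','"']) [';'] ['\\',';'] = _
        rw [replace_single, replace_single, replace_single, chain_eq_esc]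
      rw [hrep]
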